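-- pv_equiv track=rewrite | github.com/Schwank-Lab/evoCjCas9 | Nuclease_comparisons/20230420_LS_CasMini_Analysis_150bp_stream.py | barcodelookupfunc
-- ===== SOURCE A (Python) =====
-- def mergeDict(dict1, dict2):
--         ''' Merge dictionaries and keep values of common keys in list'''
--         dict3 = {**dict1, **dict2}
--         for key, value in dict3.items():
--             if key in dict1 and key in dict2:
--                 dict3[key] = [value , dict1[key]]
--         return dict3
--
-- def barcodelookupfunc(barcodetemplate):
--     ''' Convert series of barcode matches to lookup dictionary'''
--     barcodelookup = {}
--     for index, valuelist in barcodetemplate.items():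
--         tempdict = {}
--         for value in valuelist:
--             tempdict[value]=index
--         barcodelookup = mergeDict(barcodelookup,tempdict)
--
--     for key in barcodelookup:
--         if type(barcodelookup[key]) == list:
--             templist = list(map(int, str(barcodelookup[key]).replace("[","").strip("]").split(', ')))
--             barcodelookup[key] = templist
--         if type(barcodelookup[key]) == int:
--             barcodelookup[key] = [barcodelookup[key]]
--     return barcodelookup
-- ===== SOURCE B (Python) =====
-- def barcodelookupfunc(barcodetemplate):
--     ''' Convert series of barcode matches to lookup dictionary (direct construction:
--     distinct values in first-appearance order, then one reverse scan per value). '''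
--     items = list(barcodetemplate.items())
--     values = []
--     for _, valuelist in items:
--         for v in valuelist:
--             if v not in values:
--                 values.append(v)
--     return {v: [index for index, valuelist in reversed(items) if v in valuelist]
--             for v in values}
-- ===== Notes on version B (the rewrite author's own statement) =====
-- stated objective: simpler
-- what changed: Replaces A's incremental dict-merge with nested two-element list values plus a stringify/replace/strip/split/int re-parse flatten by direct construction: collect the distinct barcode values in first-appearance order, then for each value scan the items once in reverse collecting the indices whose valuelist contains it.
import Mathlib
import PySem

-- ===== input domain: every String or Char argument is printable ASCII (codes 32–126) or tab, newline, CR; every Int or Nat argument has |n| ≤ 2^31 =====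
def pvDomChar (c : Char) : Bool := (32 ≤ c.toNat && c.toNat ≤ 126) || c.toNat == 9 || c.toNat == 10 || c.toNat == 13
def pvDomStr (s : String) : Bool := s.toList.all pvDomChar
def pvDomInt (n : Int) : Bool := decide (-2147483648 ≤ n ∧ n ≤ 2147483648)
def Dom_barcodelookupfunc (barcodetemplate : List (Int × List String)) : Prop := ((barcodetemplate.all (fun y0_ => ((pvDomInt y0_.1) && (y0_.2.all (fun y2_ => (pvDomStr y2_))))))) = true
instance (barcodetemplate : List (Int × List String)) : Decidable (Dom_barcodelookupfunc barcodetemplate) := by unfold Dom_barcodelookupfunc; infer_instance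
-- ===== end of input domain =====

-- B replaces A's incremental dict-merging (nested [new, old] list values flattened afterwards
-- through a str()/replace/strip/split/int round-trip) by a direct construction: distinct values
-- in first-appearance order, then one reverse scan per value collecting its indices (objective:
-- simpler).  A mutates its accumulator dicts only; neither version mutates the argument.

-- ===== PORT A =====
-- Values held in A's accumulator dict: a Python int, or a nested two-element list [value, older].
inductive AVal where
  | int : Int → AVal
  | pair : AVal → AVal → AVal
deriving DecidableEq, Repr

-- str(value) for such a value, ported by hand (exact: str of an int is PySem.Int.toChars, and
-- str([a, b]) = "[" + str(a) + ", " + str(b) + "]").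
def aValStr : AVal → List Char
  | .int n => PySem.Int.toChars n
  | .pair a b => '[' :: (aValStr a ++ [',', ' '] ++ aValStr b ++ [']'])

-- int(token), ported by hand; exact on the optional-sign decimal digit strings that the tokens
-- of A's final loop always are (they are pieces of str() of ints).
def pyIntTok (cs : List Char) : Int :=
  match cs with
  | '-' :: ds => -(ds.foldl (fun a c => 10 * a + ((c.toNat - 48 : Nat) : Int)) 0)
  | ds => ds.foldl (fun a c => 10 * a + ((c.toNat - 48 : Nat) : Int)) 0

-- ''' Merge dictionaries and keep values of common keys in list'''
def mergeDictA (dict1 dict2 : PySem.Dict String AVal) : PySem.Dict String AVal :=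
  -- dict3 = {**dict1, **dict2}
  let dict3 := dict2.items.foldl (fun d p => d.insert p.1 p.2) dict1
  -- for key, value in dict3.items(): if key in dict1 and key in dict2: dict3[key] = [value, dict1[key]]
  -- (iterating the items snapshot is exact: the loop only overwrites the key it is visiting;
  --  dict1[key] is guarded by 'key in dict1', so getD's default is never reached)
  dict3.items.foldl
    (fun d p =>
      if dict1.contains p.1 && dict2.contains p.1 then d.insert p.1 (.pair p.2 (dict1.getD p.1 p.2))
      else d)
    dict3

-- the body of A's final loop for one (key, value) item: the value is rewritten in place,
-- keys are untouched, so the loop is a map over the items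
def aFinal (kv : String × AVal) : String × List Int :=
  match kv.2 with
  | .int n => (kv.1, [n])                 -- if type(...) == int: [value]
  | v => (kv.1,                           -- if type(...) == list: the str()-flatten
      (PySem.Chars.splitOn
        (PySem.Chars.stripChars (PySem.Chars.replace (aValStr v) ['['] []) [']'])
        [',', ' ']).map pyIntTok)

def barcodelookupfunc (barcodetemplate : List (Int × List String)) : List (String × List Int) :=
  -- the association list is barcodetemplate.items() (a dict's items have distinct keys)
  let barcodelookup :=
    barcodetemplate.foldl
      (fun acc p =>
        let tempdict := p.2.foldl (fun td v => td.insert v (AVal.int p.1)) PySem.Dict.empty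
        mergeDictA acc tempdict)
      PySem.Dict.empty
  barcodelookup.items.map aFinal

-- ===== PORT B =====
def barcodelookupfunc_alt (barcodetemplate : List (Int × List String)) : List (String × List Int) :=
  let values := barcodetemplate.foldl
    (fun acc p => p.2.foldl (fun a v => if v ∈ a then a else a ++ [v]) acc) []
  values.map (fun v =>
    (v, (barcodetemplate.reverse.filter (fun p => decide (v ∈ p.2))).map (·.1)))

-- ===== PRECONDITION & SPEC =====
def Spec_barcodelookupfunc (barcodetemplate : List (Int × List String)) (out : List (String × List Int)) : Prop := out = barcodelookupfunc_alt barcodetemplate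
instance (barcodetemplate : List (Int × List String)) (out : List (String × List Int)) : Decidable (Spec_barcodelookupfunc barcodetemplate out) := by unfold Spec_barcodelookupfunc; infer_instance

-- ===== CLAIM (what is proved, stated in full; the proofs are below) =====
def Claim_equal_barcodelookupfunc : Prop := ∀ (barcodetemplate : List (Int × List String)), Dom_barcodelookupfunc barcodetemplate → Spec_barcodelookupfunc barcodetemplate (barcodelookupfunc barcodetemplate)

-- ===== LEMMAS AND PROOFS =====

-- ---- proof-side vocabulary ----

-- B's distinct-value accumulation
def addVals (acc vs : List String) : List String :=
  vs.foldl (fun a v => if v ∈ a then a else a ++ [v]) acc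
def dvals (l : List (Int × List String)) : List String :=
  l.foldl (fun acc p => addVals acc p.2) []
-- indices whose valuelist contains v, in list order
def idxs (v : String) (l : List (Int × List String)) : List Int :=
  (l.filter (fun p => decide (v ∈ p.2))).map (·.1)
-- A's nested value for the REVERSED index list i :: t
def encR : Int → List Int → AVal
  | i, [] => .int i
  | i, j :: t => .pair (.int i) (encR j t)
-- A's dict value for v after processing l
def valOf (v : String) (l : List (Int × List String)) : AVal :=
  match (idxs v l).reverse with
  | [] => .int 0
  | i :: t => encR i t
-- ", "-separated concatenation (what the flattened str() body is made of)
def sepCat : List (List Char) → List Char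
  | [] => []
  | [p] => p
  | p :: q :: ps => p ++ [',', ' '] ++ sepCat (q :: ps)

-- ---- small list facts about B's value accumulation ----

theorem mem_addVals (acc vs : List String) (x : String) :
    x ∈ addVals acc vs ↔ x ∈ acc ∨ x ∈ vs := by
  induction vs generalizing acc with
  | nil => simp [addVals]
  | cons v vs ih =>
    simp only [addVals, List.foldl_cons] at *
    by_cases h : v ∈ acc
    · simp only [h, if_true, ih, List.mem_cons]
      constructor
      · rintro (h'|h') <;> tauto
      · rintro (h'|rfl|h') <;> tauto
    · simp only [h, if_false, ih, List.mem_append, List.mem_singleton, List.mem_cons]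
      constructor
      · rintro ((h'|h')|h') <;> simp_all <;> tauto
      · rintro (h'|rfl|h') <;> simp_all <;> tauto

theorem nodup_addVals (acc vs : List String) (h : acc.Nodup) : (addVals acc vs).Nodup := by
  induction vs generalizing acc with
  | nil => exact h
  | cons v vs ih =>
    simp only [addVals, List.foldl_cons]
    by_cases hv : v ∈ acc
    · rw [if_pos hv]; exact ih acc h
    · rw [if_neg hv]
      refine ih (acc ++ [v]) ?_
      rw [List.nodup_append]
      exact ⟨h, List.nodup_singleton v, by
        intro a ha b hb e
        exact hv ((List.mem_singleton.mp hb) ▸ e ▸ ha)⟩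

theorem addVals_eq (acc vs : List String) :
    addVals acc vs = acc ++ (addVals [] vs).filter (fun v => decide (v ∉ acc)) := by
  induction vs generalizing acc with
  | nil => simp [addVals]
  | cons v vs ih =>
    have hv0 : addVals [] (v :: vs) = v :: (addVals [] vs).filter (fun x => decide (x ≠ v)) := by
      simp only [addVals, List.foldl_cons, List.not_mem_nil, if_false, List.nil_append]
      have := ih (acc := [v])
      simp only [addVals] at this ⊢
      rw [this]
      simp
    rw [show addVals acc (v :: vs) = addVals (if v ∈ acc then acc else acc ++ [v]) vs by
      simp [addVals]]
    by_cases h : v ∈ acc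
    · rw [if_pos h, ih, hv0]
      congr 1
      simp only [List.filter_cons, decide_eq_true_eq, h, not_true, decide_false, if_neg,
        List.filter_filter]
      rw [if_neg (by simp [h])]
      apply List.filter_congr
      intro x hx
      by_cases hxa : x ∈ acc
      · simp [hxa]
      · simp [hxa, show x ≠ v from fun e => hxa (e ▸ h)]
    · rw [if_neg h, ih, hv0]
      simp only [List.filter_cons, List.append_assoc]
      rw [if_pos (by simp [h])]
      congr 1
      simp only [List.singleton_append, List.cons.injEq, true_and, List.filter_filter]
      apply List.filter_congr
      intro x hx
      by_cases hxv : x = v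
      · simp [hxv, h]
      · simp [hxv, List.mem_append]

theorem nodup_dvals (l : List (Int × List String)) : (dvals l).Nodup := by
  have : ∀ acc : List String, acc.Nodup → (l.foldl (fun acc p => addVals acc p.2) acc).Nodup := by
    induction l with
    | nil => intro acc h; simpa using h
    | cons p l ih => intro acc h; exact ih _ (nodup_addVals _ _ h)
  exact this [] (by simp)

theorem mem_dvals (l : List (Int × List String)) (v : String) :
    v ∈ dvals l ↔ ∃ p ∈ l, v ∈ p.2 := by
  have : ∀ acc, v ∈ l.foldl (fun acc p => addVals acc p.2) acc ↔ v ∈ acc ∨ ∃ p ∈ l, v ∈ p.2 := by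
    induction l with
    | nil => simp
    | cons p l ih =>
      intro acc
      rw [List.foldl_cons, ih, mem_addVals]
      simp only [List.mem_cons]
      constructor
      · rintro ((h|h)|⟨q, hq, hvq⟩) <;> [tauto; exact Or.inr ⟨p, by tauto, h⟩; exact Or.inr ⟨q, by tauto, hvq⟩]
      · rintro (h|⟨q, (rfl|hq), hvq⟩) <;> tauto
  simpa [dvals] using this []

theorem idxs_ne_nil_iff (l : List (Int × List String)) (v : String) :
    idxs v l ≠ [] ↔ ∃ p ∈ l, v ∈ p.2 := by
  simp only [idxs, ne_eq, List.map_eq_nil_iff, List.filter_eq_nil_iff, decide_eq_true_eq]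
  push_neg
  rfl

-- ---- dict-state lemmas ----

theorem keys_of_items {S : List String} {f : String → AVal} (d : PySem.Dict String AVal)
    (hd : d.items = S.map (fun v => (v, f v))) : d.keys = S := by
  show d.items.map (·.1) = S
  rw [hd, List.map_map]
  exact (List.map_congr_left (fun a _ => rfl)).trans (List.map_id _)

theorem contains_of_items {S : List String} {f : String → AVal} (d : PySem.Dict String AVal)
    (hd : d.items = S.map (fun v => (v, f v))) (x : String) :
    d.contains x = decide (x ∈ S) := by
  rw [PySem.Dict.contains_eq_decide_mem_keys, keys_of_items d hd]

theorem items_foldl_insert_const (c : AVal) (vs : List String) :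
    ∀ (d : PySem.Dict String AVal) (S : List String) (f : String → AVal), S.Nodup →
    d.items = S.map (fun v => (v, f v)) →
    (vs.foldl (fun d v => d.insert v c) d).items
      = (addVals S vs).map (fun v => (v, if v ∈ vs then c else f v)) := by
  induction vs with
  | nil => intro d S f _ hd; simpa [addVals] using hd
  | cons v vs ih =>
    intro d S f hS hd
    rw [List.foldl_cons]
    have hadd : addVals S (v :: vs) = addVals (if v ∈ S then S else S ++ [v]) vs := by
      simp [addVals]
    by_cases hv : v ∈ S
    · have hc : d.contains v = true := by rw [contains_of_items d hd]; simpa using hv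
      have hins : (d.insert v c).items
          = S.map (fun w => (w, if w = v then c else f w)) := by
        rw [PySem.Dict.items_insert_of_contains d c hc, hd, List.map_map]
        apply List.map_congr_left
        intro w _
        by_cases hwv : w = v <;> simp [hwv]
      rw [ih (d.insert v c) S (fun w => if w = v then c else f w) hS hins, hadd, if_pos hv]
      apply List.map_congr_left
      intro w _
      by_cases h1 : w ∈ vs
      · simp [h1]
      · by_cases h2 : w = v <;> simp [h1, h2]
    · have hc : d.contains v = false := by rw [contains_of_items d hd]; simpa using hv
      have hins : (d.insert v c).items
          = (S ++ [v]).map (fun w => (w, if w = v then c else f w)) := by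
        rw [PySem.Dict.items_insert_of_not_contains d c hc, hd, List.map_append]
        congr 1
        · apply List.map_congr_left
          intro w hw
          have : w ≠ v := fun e => hv (e ▸ hw)
          simp [this]
        · simp
      have hS' : (S ++ [v]).Nodup := by
        rw [List.nodup_append]
        exact ⟨hS, List.nodup_singleton v, by
          intro a ha b hb e
          exact hv ((List.mem_singleton.mp hb) ▸ e ▸ ha)⟩
      rw [ih (d.insert v c) (S ++ [v]) (fun w => if w = v then c else f w) hS' hins, hadd,
        if_neg hv]
      apply List.map_congr_left
      intro w _
      by_cases h1 : w ∈ vs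
      · simp [h1]
      · by_cases h2 : w = v <;> simp [h1, h2]

theorem items_foldl_guard_insert (C : String → Bool) (h : String × AVal → AVal)
    (L2 : List (String × AVal)) :
    ∀ (L1 : List (String × AVal)) (d : PySem.Dict String AVal),
    ((L1 ++ L2).map (·.1)).Nodup → d.items = L1 ++ L2 →
    (L2.foldl (fun d p => if C p.1 then d.insert p.1 (h p) else d) d).items
      = L1 ++ L2.map (fun p => if C p.1 then (p.1, h p) else p) := by
  induction L2 with
  | nil => intro L1 d _ hd; simpa using hd
  | cons p L2 ih =>
    intro L1 d hnd hd
    have hkey : ∀ q ∈ L1 ++ L2, q.1 ≠ p.1 := by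
      intro q hq
      have h1 : ((L1 ++ p :: L2).map (·.1)).Nodup := hnd
      rw [show L1 ++ p :: L2 = (L1 ++ [p]) ++ L2 by simp] at h1
      -- p.1 occurs exactly once; use List.Nodup on the key list
      have : (L1.map (·.1) ++ p.1 :: L2.map (·.1)).Nodup := by simpa using hnd
      rcases List.mem_append.mp hq with hql | hql
      · intro e
        have hmem : p.1 ∈ L1.map (·.1) := e ▸ List.mem_map_of_mem hql
        exact (List.nodup_append.mp this).2.2 p.1 hmem p.1 (List.mem_cons_self) rfl
      · intro e
        have hnd2 : (p.1 :: L2.map (·.1)).Nodup := (List.nodup_append.mp this).2.1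
        have hmem : p.1 ∈ L2.map (·.1) := e ▸ List.mem_map_of_mem hql
        exact (List.nodup_cons.mp hnd2).1 hmem
    rw [List.foldl_cons]
    by_cases hC : C p.1 = true
    · have hc : d.contains p.1 = true := by
        rw [PySem.Dict.contains_eq_decide_mem_keys]
        have : p.1 ∈ d.keys := by
          show p.1 ∈ d.items.map (·.1)
          rw [hd]; exact List.mem_map_of_mem (by simp)
        simpa using this
      have hins : (d.insert p.1 (h p)).items = L1 ++ (p.1, h p) :: L2 := by
        rw [PySem.Dict.items_insert_of_contains d (h p) hc, hd]
        rw [List.map_append, List.map_cons]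
        simp only [BEq.rfl, if_true]
        congr 1
        · exact (List.map_congr_left (fun q hq => by
            rw [if_neg (by simpa using hkey q (List.mem_append_left _ hq))]; rfl)).trans
            (List.map_id _)
        · congr 1
          exact (List.map_congr_left (fun q hq => by
            rw [if_neg (by simpa using hkey q (List.mem_append_right _ hq))]; rfl)).trans
            (List.map_id _)
      rw [if_pos hC]
      have hnd' : (((L1 ++ [(p.1, h p)]) ++ L2).map (·.1)).Nodup := by
        simpa using hnd
      rw [ih (L1 ++ [(p.1, h p)]) (d.insert p.1 (h p)) hnd' (by simpa using hins)]
      simp [hC]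
    · rw [if_neg (by simpa using hC)]
      have hnd' : (((L1 ++ [p]) ++ L2).map (·.1)).Nodup := by simpa using hnd
      rw [ih (L1 ++ [p]) d hnd' (by simpa using hd)]
      simp [hC]

theorem addVals_fresh (T : List String) :
    ∀ acc, T.Nodup → (∀ t ∈ T, t ∉ acc) → addVals acc T = acc ++ T := by
  induction T with
  | nil => intro acc _ _; simp [addVals]
  | cons t T ih =>
    intro acc hnd hdisj
    have ht : t ∉ acc := hdisj t (by simp)
    rw [show addVals acc (t :: T) = addVals (if t ∈ acc then acc else acc ++ [t]) T by
      simp [addVals], if_neg ht]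
    rw [ih (acc ++ [t]) (List.nodup_cons.mp hnd).2 ?_]
    · simp
    · intro u hu
      simp only [List.mem_append, List.mem_singleton]
      rintro (h' | rfl)
      · exact hdisj u (by simp [hu]) h'
      · exact (List.nodup_cons.mp hnd).1 hu

theorem addVals_nil_of_nodup (T : List String) (hT : T.Nodup) : addVals [] T = T := by
  simpa using addVals_fresh T [] hT (by simp)

theorem nodup_U (S T : List String) (hS : S.Nodup) (hT : T.Nodup) :
    (S ++ T.filter (fun v => decide (v ∉ S))).Nodup := by
  rw [List.nodup_append]
  refine ⟨hS, hT.filter _, ?_⟩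
  intro a ha b hb e
  have := List.of_mem_filter hb
  simp only [decide_eq_true_eq] at this
  exact this (e ▸ ha)

theorem mergeDictA_items (d1 d2 : PySem.Dict String AVal) (S T : List String)
    (f : String → AVal) (i : Int) (hS : S.Nodup) (hT : T.Nodup)
    (h1 : d1.items = S.map (fun v => (v, f v))) (h2 : d2.items = T.map (fun v => (v, AVal.int i))) :
    (mergeDictA d1 d2).items
      = (S ++ T.filter (fun v => decide (v ∉ S))).map
          (fun v => (v, if v ∈ T then (if v ∈ S then AVal.pair (AVal.int i) (f v) else AVal.int i)
                        else f v)) := by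
  have hfold : d2.items.foldl (fun d p => d.insert p.1 p.2) d1
      = T.foldl (fun d v => d.insert v (AVal.int i)) d1 := by
    rw [h2, List.foldl_map]
  have h3 : (T.foldl (fun d v => d.insert v (AVal.int i)) d1).items
      = (S ++ T.filter (fun v => decide (v ∉ S))).map
          (fun v => (v, if v ∈ T then AVal.int i else f v)) := by
    rw [items_foldl_insert_const (AVal.int i) T d1 S f hS h1, addVals_eq,
      addVals_nil_of_nodup T hT]
  have hndU := nodup_U S T hS hT
  set U := S ++ T.filter (fun v => decide (v ∉ S)) with hU
  set d3 := T.foldl (fun d v => d.insert v (AVal.int i)) d1 with hd3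
  have hkeys : ((([] : List (String × AVal)) ++ d3.items).map (·.1)).Nodup := by
    rw [List.nil_append, h3, List.map_map]
    have : (List.map ((fun x => x.1) ∘ fun v => (v, if v ∈ T then AVal.int i else f v)) U) = U :=
      (List.map_congr_left (fun a _ => rfl)).trans (List.map_id _)
    rw [this]
    exact hndU
  have hmain := items_foldl_guard_insert
    (fun k => d1.contains k && d2.contains k)
    (fun p => AVal.pair p.2 (d1.getD p.1 p.2)) d3.items [] d3 hkeys (by simp)
  have hunfold : mergeDictA d1 d2
      = List.foldl
          (fun d p =>
            if d1.contains p.1 && d2.contains p.1 then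
              d.insert p.1 (AVal.pair p.2 (d1.getD p.1 p.2))
            else d)
          d3 d3.items := by
    simp only [mergeDictA]
    rw [hfold]
  rw [hunfold, hmain, List.nil_append, h3, List.map_map]
  apply List.map_congr_left
  intro v hv
  have hC : (d1.contains v && d2.contains v) = (decide (v ∈ S) && decide (v ∈ T)) := by
    rw [contains_of_items d1 h1, contains_of_items d2 h2]
  have hgetD : v ∈ S → ∀ w, d1.getD v w = f v := by
    intro hvS w
    exact PySem.Dict.getD_of_mem_items d1 (h1 ▸ List.mem_map_of_mem hvS)
      ((keys_of_items d1 h1) ▸ hS) w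
  by_cases hvS : v ∈ S <;> by_cases hvT : v ∈ T <;>
    simp only [Function.comp, hC, hvS, hvT, decide_true, decide_false, Bool.and_self,
      Bool.and_false, Bool.false_and, Bool.and_true, Bool.true_and, if_true, if_false,
      reduceIte] <;>
    simp [hgetD, hvS, hvT]

theorem lookup_items (l : List (Int × List String)) :
    (l.foldl
      (fun acc p =>
        let tempdict := p.2.foldl (fun td v => td.insert v (AVal.int p.1)) PySem.Dict.empty
        mergeDictA acc tempdict)
      PySem.Dict.empty).items
      = (dvals l).map (fun v => (v, valOf v l)) := by
  induction l using List.reverseRecOn with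
  | nil => simp [dvals]; rfl
  | append_singleton l p ih =>
    rw [List.foldl_append, List.foldl_cons, List.foldl_nil]
    have htd : (p.2.foldl (fun td v => td.insert v (AVal.int p.1)) PySem.Dict.empty).items
        = (addVals [] p.2).map (fun v => (v, AVal.int p.1)) := by
      rw [items_foldl_insert_const (AVal.int p.1) p.2 PySem.Dict.empty [] (fun _ => AVal.int 0)
        (by simp) rfl]
      apply List.map_congr_left
      intro v hv
      have : v ∈ p.2 := by
        rcases (mem_addVals [] p.2 v).mp hv with h | h
        · cases h
        · exact h
      simp [this]
    rw [mergeDictA_items _ _ (dvals l) (addVals [] p.2) (fun v => valOf v l) p.1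
      (nodup_dvals l) (nodup_addVals [] p.2 (by simp)) ih htd]
    have hdv : dvals (l ++ [p])
        = dvals l ++ (addVals [] p.2).filter (fun v => decide (v ∉ dvals l)) := by
      show (l ++ [p]).foldl (fun acc q => addVals acc q.2) [] = _
      rw [List.foldl_append, List.foldl_cons, List.foldl_nil]
      exact addVals_eq (dvals l) p.2
    rw [← hdv]
    apply List.map_congr_left
    intro v hv
    have hvT : v ∈ addVals [] p.2 ↔ v ∈ p.2 := by
      rw [mem_addVals]; simp
    have hvS : v ∈ dvals l ↔ idxs v l ≠ [] := by
      rw [mem_dvals, ← idxs_ne_nil_iff]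
    have hidx : idxs v (l ++ [p])
        = idxs v l ++ (if v ∈ p.2 then [p.1] else []) := by
      simp only [idxs, List.filter_append, List.map_append]
      congr 1
      by_cases h : v ∈ p.2 <;> simp [h]
    by_cases hp2 : v ∈ p.2
    · rw [if_pos (hvT.mpr hp2)]
      have hrev : (idxs v (l ++ [p])).reverse = p.1 :: (idxs v l).reverse := by
        rw [hidx, if_pos hp2]; simp
      by_cases hS : v ∈ dvals l
      · rw [if_pos hS]
        obtain ⟨j, t, hjt⟩ : ∃ j t, (idxs v l).reverse = j :: t := by
          have : (idxs v l).reverse ≠ [] := by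
            simpa using hvS.mp hS
          cases h' : (idxs v l).reverse with
          | nil => exact absurd h' this
          | cons j t => exact ⟨j, t, rfl⟩
        have h1 : valOf v l = encR j t := by rw [valOf, hjt]
        have h2 : valOf v (l ++ [p]) = encR p.1 (j :: t) := by
          rw [valOf, hrev, hjt]
        rw [h1, h2]
        rfl
      · rw [if_neg hS]
        have hnil : idxs v l = [] := by
          by_contra hne
          exact hS (hvS.mpr hne)
        have : valOf v (l ++ [p]) = encR p.1 [] := by
          rw [valOf, hrev, hnil]
          rfl
        rw [this]
        rfl
    · rw [if_neg (fun h => hp2 (hvT.mp h))]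
      have : idxs v (l ++ [p]) = idxs v l := by rw [hidx, if_neg hp2, List.append_nil]
      rw [valOf, valOf, this]

-- ---- the str()-flatten round-trip ----

theorem digitChar_val (d : Nat) (hd : d < 10) : ((Nat.digitChar d).toNat - 48 : Nat) = d := by
  interval_cases d <;> rfl

theorem dv_toDigits (m : Nat) :
    (Nat.toDigits 10 m).foldl (fun a c => 10 * a + ((c.toNat - 48 : Nat) : Int)) 0 = m := by
  induction m using Nat.strong_induction_on with
  | _ m ih =>
    rw [Nat.toDigits_eq_if (by norm_num)]
    by_cases h : m < 10
    · rw [if_pos h]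
      simp [digitChar_val m h]
    · rw [if_neg h]
      rw [List.foldl_append]
      rw [ih (m / 10) (Nat.div_lt_self (by omega) (by norm_num))]
      simp only [List.foldl_cons, List.foldl_nil]
      rw [digitChar_val (m % 10) (Nat.mod_lt _ (by norm_num))]
      push_cast
      omega

theorem isDigit_ne (c : Char) (hd : c.isDigit = true) :
    c ≠ '-' ∧ c ≠ '[' ∧ c ≠ ']' ∧ c ≠ ',' ∧ c ≠ ' ' := by
  refine ⟨?_, ?_, ?_, ?_, ?_⟩ <;> (intro e; subst e; exact absurd hd (by decide))

theorem toChars_mem (n : Int) (c : Char) (hc : c ∈ PySem.Int.toChars n) :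
    c = '-' ∨ c.isDigit = true := by
  rw [PySem.Int.toChars] at hc
  by_cases h : n < 0
  · rw [if_pos h] at hc
    rcases List.mem_cons.mp hc with e | hm
    · exact Or.inl e
    · exact Or.inr (Nat.isDigit_of_mem_toDigits (by norm_num) (by norm_num) hm)
  · rw [if_neg h] at hc
    exact Or.inr (Nat.isDigit_of_mem_toDigits (by norm_num) (by norm_num) hc)

theorem pyIntTok_toChars (n : Int) : pyIntTok (PySem.Int.toChars n) = n := by
  rw [PySem.Int.toChars]
  by_cases h : n < 0
  · rw [if_pos h]
    show pyIntTok ('-' :: Nat.toDigits 10 n.natAbs) = n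
    rw [pyIntTok]
    rw [dv_toDigits]
    omega
  · rw [if_neg h]
    obtain ⟨c, cs, hc⟩ : ∃ c cs, Nat.toDigits 10 n.toNat = c :: cs := by
      cases e : Nat.toDigits 10 n.toNat with
      | nil =>
        have := @Nat.length_toDigits_pos 10 n.toNat
        rw [e] at this; simp at this
      | cons c cs => exact ⟨c, cs, rfl⟩
    have hcd : c.isDigit = true :=
      Nat.isDigit_of_mem_toDigits (by norm_num) (by norm_num) (hc ▸ List.mem_cons_self)
    have hcne : c ≠ '-' := (isDigit_ne c hcd).1
    rw [hc, pyIntTok.eq_def]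
    split
    · rename_i ds heq
      exact absurd (List.cons.inj heq).1 hcne
    · rw [← hc, dv_toDigits]
      omega

theorem replace_go_br (fuel : Nat) :
    ∀ (l acc : List Char), l.length ≤ fuel →
    PySem.Chars.replace.go ['['] [] fuel l acc
      = acc.reverse ++ l.filter (fun c => decide (c ≠ '[')) := by
  induction fuel with
  | zero =>
    intro l acc hl
    have : l = [] := List.length_eq_zero_iff.mp (Nat.le_zero.mp hl)
    subst this
    rw [PySem.Chars.replace.go]
    simp
  | succ fuel ih =>
    intro l acc hl
    cases l with
    | nil =>
      rw [PySem.Chars.replace.go]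
      · simp
      · omega
    | cons c t =>
      rw [PySem.Chars.replace.go]
      by_cases hc : c = '['
      · subst hc
        rw [if_pos (show (['['].isPrefixOf ('[' :: t)) = true by simp [List.isPrefixOf])]
        show PySem.Chars.replace.go ['['] [] fuel t acc = _
        rw [ih t acc (by simpa using hl)]
        simp
      · rw [if_neg (by simp [List.isPrefixOf]; exact fun e => hc e.symm)]
        rw [ih t (c :: acc) (by simpa using hl)]
        simp [hc]

theorem replace_br (cs : List Char) :
    PySem.Chars.replace cs ['['] [] = cs.filter (fun c => decide (c ≠ '[')) := by
  rw [PySem.Chars.replace]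
  rw [if_neg (by decide)]
  rw [replace_go_br cs.length cs [] le_rfl]
  simp

theorem dropWhile_br_replicate_append (k : Nat) (ys : List Char) :
    List.dropWhile (fun c => [']'].contains c) (List.replicate k ']' ++ ys)
      = List.dropWhile (fun c => [']'].contains c) ys := by
  induction k with
  | zero => simp
  | succ k ih => simpa [List.replicate_succ] using ih

theorem dropWhile_br_no_mem (l : List Char) (h : ']' ∉ l) :
    List.dropWhile (fun c => [']'].contains c) l = l := by
  cases l with
  | nil => rfl
  | cons c t =>
    rw [List.dropWhile_cons, if_neg]
    simp only [List.contains_eq_mem, List.mem_singleton, decide_eq_true_eq]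
    intro e
    exact h (by simp [e])

theorem strip_br (xs : List Char) (k : Nat) (hx : ']' ∉ xs) :
    PySem.Chars.stripChars (xs ++ List.replicate k ']') [']'] = xs := by
  rw [PySem.Chars.stripChars]
  cases xs with
  | nil =>
    rw [List.nil_append]
    rw [show List.replicate k ']' = List.replicate k ']' ++ [] by simp]
    rw [dropWhile_br_replicate_append]
    simp
  | cons h t =>
    have hh : ¬ (fun c => [']'].contains c) h = true := by
      simp only [List.contains_eq_mem, List.mem_singleton, decide_eq_true_eq]
      intro e
      exact hx (by simp [e])
    rw [show List.dropWhile (fun c => [']'].contains c) ((h :: t) ++ List.replicate k ']')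
        = (h :: t) ++ List.replicate k ']' by
      rw [List.cons_append, List.dropWhile_cons, if_neg hh]]
    rw [List.reverse_append, List.reverse_replicate]
    rw [dropWhile_br_replicate_append]
    rw [dropWhile_br_no_mem _ (fun hm => hx (List.mem_reverse.mp hm))]
    simp

theorem splitOn_go_nil (fuel : Nat) (cur : List Char) (acc : List (List Char)) :
    PySem.Chars.splitOn.go [',', ' '] fuel [] cur acc = (cur.reverse :: acc).reverse := by
  cases fuel with
  | zero => rw [PySem.Chars.splitOn.go]; simp
  | succ fuel =>
    rw [PySem.Chars.splitOn.go]
    omega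

theorem splitOn_go_part (p : List Char) (hp : ∀ c ∈ p, c ≠ ',') :
    ∀ (fuel : Nat) (l cur : List Char) (acc : List (List Char)), (p ++ l).length ≤ fuel →
    PySem.Chars.splitOn.go [',', ' '] fuel (p ++ l) cur acc
      = PySem.Chars.splitOn.go [',', ' '] (fuel - p.length) l (p.reverse ++ cur) acc := by
  induction p with
  | nil => intro fuel l cur acc _; simp
  | cons c p ih =>
    intro fuel l cur acc hf
    cases fuel with
    | zero => simp at hf
    | succ fuel =>
      rw [List.cons_append, PySem.Chars.splitOn.go]
      rw [if_neg (by
        have hc : c ≠ ',' := hp c (by simp)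
        simp only [List.isPrefixOf, Bool.and_eq_true, beq_iff_eq]
        intro h
        exact hc h.1.symm)]
      rw [ih (fun d hd => hp d (by simp [hd])) fuel l (c :: cur) acc (by simpa using hf)]
      simp

theorem splitOn_go_sep (fuel : Nat) (l cur : List Char) (acc : List (List Char)) :
    PySem.Chars.splitOn.go [',', ' '] (fuel + 1) (',' :: ' ' :: l) cur acc
      = PySem.Chars.splitOn.go [',', ' '] fuel l [] (cur.reverse :: acc) := by
  rw [PySem.Chars.splitOn.go]
  rw [if_pos (by simp [List.isPrefixOf])]
  rfl

theorem splitOn_go_sepCat (parts : List (List Char)) :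
    ∀ (acc : List (List Char)) (fuel : Nat), parts ≠ [] → (∀ p ∈ parts, ',' ∉ p) →
    (sepCat parts).length ≤ fuel →
    PySem.Chars.splitOn.go [',', ' '] fuel (sepCat parts) [] acc
      = acc.reverse ++ parts := by
  induction parts with
  | nil => intro _ _ h; exact absurd rfl h
  | cons p rest ih =>
    intro acc fuel _ hcf hlen
    cases rest with
    | nil =>
      rw [show sepCat [p] = p ++ [] by simp [sepCat]] at hlen ⊢
      rw [splitOn_go_part p (fun c hc e => hcf p (by simp) (e ▸ hc)) fuel [] [] acc hlen]
      rw [splitOn_go_nil]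
      simp
    | cons q ps =>
      rw [show sepCat (p :: q :: ps) = p ++ (',' :: ' ' :: sepCat (q :: ps)) by
        simp [sepCat]] at hlen ⊢
      rw [splitOn_go_part p (fun c hc e => hcf p (by simp) (e ▸ hc)) fuel _ [] acc hlen]
      obtain ⟨f', hf'⟩ : ∃ f', fuel - p.length = f' + 1 := by
        have := hlen
        simp only [List.length_append, List.length_cons] at this
        exact ⟨fuel - p.length - 1, by omega⟩
      rw [hf', splitOn_go_sep]
      have hstep := ih ((p.reverse ++ []).reverse :: acc) f' (by simp)
        (fun r hr => hcf r (by simp [hr]))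
        (by simp only [List.length_append, List.length_cons] at hlen; omega)
      rw [hstep]
      simp

theorem toChars_not_mem (n : Int) (c : Char) (hc : c ∈ PySem.Int.toChars n) :
    c ≠ '[' ∧ c ≠ ']' ∧ c ≠ ',' := by
  rcases toChars_mem n c hc with e | hd
  · subst e; exact ⟨by decide, by decide, by decide⟩
  · exact ⟨(isDigit_ne c hd).2.1, (isDigit_ne c hd).2.2.1, (isDigit_ne c hd).2.2.2.1⟩

theorem mem_sepCat (parts : List (List Char)) (c : Char) (hc : c ∈ sepCat parts) :
    (∃ p ∈ parts, c ∈ p) ∨ c = ',' ∨ c = ' ' := by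
  induction parts with
  | nil => cases hc
  | cons p rest ih =>
    cases rest with
    | nil =>
      exact Or.inl ⟨p, by simp, by simpa [sepCat] using hc⟩
    | cons q ps =>
      rw [show sepCat (p :: q :: ps) = p ++ [',', ' '] ++ sepCat (q :: ps) by simp [sepCat]] at hc
      rcases List.mem_append.mp hc with h | h
      · rcases List.mem_append.mp h with h | h
        · exact Or.inl ⟨p, by simp, h⟩
        · rcases List.mem_cons.mp h with e | h
          · exact Or.inr (Or.inl e)
          · exact Or.inr (Or.inr (by simpa using h))
      · rcases ih h with ⟨r, hr, hcr⟩ | h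
        · exact Or.inl ⟨r, by simp [hr], hcr⟩
        · exact Or.inr h

theorem splitOn_sepCat (parts : List (List Char))
    (hne : parts ≠ []) (hp : ∀ p ∈ parts, ',' ∉ p) :
    PySem.Chars.splitOn (sepCat parts) [',', ' '] = parts := by
  rw [PySem.Chars.splitOn]
  rw [splitOn_go_sepCat parts [] ((sepCat parts).length + 1) hne hp (by omega)]
  simp

theorem filter_aValStr_encR (i : Int) (t : List Int) :
    (aValStr (encR i t)).filter (fun c => decide (c ≠ '['))
      = sepCat ((i :: t).map PySem.Int.toChars) ++ List.replicate t.length ']' := by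
  induction t generalizing i with
  | nil =>
    show (PySem.Int.toChars i).filter _ = _
    rw [List.filter_eq_self.mpr (fun c hc => by
      simpa using (toChars_not_mem i c hc).1)]
    simp [sepCat]
  | cons j t ih =>
    show (('[' :: (PySem.Int.toChars i ++ [',', ' '] ++ aValStr (encR j t) ++ [']'])).filter _) = _
    rw [List.filter_cons]
    rw [if_neg (by simp)]
    simp only [List.filter_append]
    rw [List.filter_eq_self.mpr (fun c hc => by
      simpa using (toChars_not_mem i c hc).1)]
    rw [ih]
    rw [show List.filter (fun c => decide (c ≠ '[')) [',', ' '] = [',', ' '] by decide]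
    rw [show List.filter (fun c => decide (c ≠ '[')) [']'] = [']'] by decide]
    rw [show sepCat ((i :: j :: t).map PySem.Int.toChars)
        = PySem.Int.toChars i ++ [',', ' '] ++ sepCat ((j :: t).map PySem.Int.toChars) by
      simp [sepCat]]
    simp [List.replicate_succ']

theorem aFinal_encR (v : String) (i : Int) (t : List Int) :
    aFinal (v, encR i t) = (v, i :: t) := by
  cases t with
  | nil => rfl
  | cons j t =>
    change (v, (PySem.Chars.splitOn
        (PySem.Chars.stripChars
          (PySem.Chars.replace (aValStr (AVal.pair (AVal.int i) (encR j t))) ['['] []) [']'])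
        [',', ' ']).map pyIntTok) = (v, i :: j :: t)
    have hnotbr : ']' ∉ sepCat ((i :: j :: t).map PySem.Int.toChars) := by
      intro hm
      rcases mem_sepCat _ _ hm with ⟨p, hp, hcp⟩ | h
      · obtain ⟨n, _, rfl⟩ := List.mem_map.mp hp
        exact (toChars_not_mem n ']' hcp).2.1 rfl
      · rcases h with h | h <;> cases h
    have hcomma : ∀ p ∈ (i :: j :: t).map PySem.Int.toChars, ',' ∉ p := by
      intro p hp hcm
      obtain ⟨n, _, rfl⟩ := List.mem_map.mp hp
      exact (toChars_not_mem n ',' hcm).2.2 rfl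
    rw [show aValStr (AVal.pair (AVal.int i) (encR j t)) = aValStr (encR i (j :: t)) from rfl]
    rw [replace_br, filter_aValStr_encR]
    rw [show List.replicate (j :: t).length ']' = List.replicate ((j :: t).length) ']' from rfl]
    rw [strip_br _ _ hnotbr]
    rw [splitOn_sepCat _ (by simp) hcomma]
    rw [List.map_map]
    congr 1
    exact (List.map_congr_left (fun n _ => pyIntTok_toChars n)).trans (List.map_id _)

-- ===== VERDICT (by name: the statement is the Claim_ definition above) =====
theorem barcodelookupfunc_spec : Claim_equal_barcodelookupfunc := by
  intro bt _
  show barcodelookupfunc bt = barcodelookupfunc_alt bt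
  simp only [barcodelookupfunc, barcodelookupfunc_alt]
  rw [lookup_items bt, List.map_map]
  rw [show bt.foldl (fun acc p => p.2.foldl (fun a v => if v ∈ a then a else a ++ [v]) acc)
      ([] : List String) = dvals bt from rfl]
  apply List.map_congr_left
  intro v hv
  have hne : (idxs v bt).reverse ≠ [] := by
    simpa using (idxs_ne_nil_iff bt v).mpr ((mem_dvals bt v).mp hv)
  obtain ⟨i, t, hit⟩ : ∃ i t, (idxs v bt).reverse = i :: t := by
    cases h' : (idxs v bt).reverse with
    | nil => exact absurd h' hne
    | cons i t => exact ⟨i, t, rfl⟩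
  have hA : aFinal (v, valOf v bt) = (v, (idxs v bt).reverse) := by
    rw [valOf, hit, aFinal_encR, ← hit]
  have hB : (bt.reverse.filter (fun p => decide (v ∈ p.2))).map (·.1)
      = (idxs v bt).reverse := by
    rw [List.filter_reverse, List.map_reverse]
    rfl
  simp only [Function.comp]
  rw [hA, hB]
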